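-- pv_equiv track=rewrite | github.com/theroyaritra/IITMadrasPythonCodeBase | Practice Test Codes/OPPE1_Mock3.py | matrix_type
-- ===== SOURCE A (Python) =====
-- def matrix_type(M):
--     """
--     Determine the type of the matrix
--
--     Argument:
--         M: list of lists
--     Return:
--         mtype: str
--     """
--     d, sc, id = True, True, True
--     s = ''
--     x = M[1][1]
--     for i in range(len(M)):
--         for j in range(len(M[i])):
--             if(i!=j and M[i][j]!=0):
--                 d=False
--                 break
--     for i in range(len(M)):
--         if(x != M[i][i]):
--             sc = False
--         if(M[i][i] != 1):
--             id = False
--     if(d):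
--         s = "diagonal"
--     else:
--         s="non-diagonal"
--     if(d == True and sc == True):
--         s = "scalar"
--     if(d == True and id == True):
--         s = "identity"
--     return s
-- ===== SOURCE B (Python) =====
-- def matrix_type(M):
--     """
--     Determine the type of the matrix
--
--     Argument:
--         M: list of lists
--     Return:
--         mtype: str
--     """
--     ref = M[1][1]
--
--     def pattern(dv):
--         # candidate matrix of M's (possibly ragged) shape: dv on the diagonal
--         # (M's own diagonal when dv is None), zeros elsewhere
--         return [[(M[i][i] if dv is None else dv) if i == j else 0
--                  for j in range(len(row))]
--                 for i, row in enumerate(M)]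
--
--     if M == pattern(1):
--         return "identity"
--     if M == pattern(ref):
--         return "scalar"
--     if M == pattern(None):
--         return "diagonal"
--     return "non-diagonal"
-- ===== Notes on version B (the rewrite author's own statement) =====
-- stated objective: alternative
-- what changed: Replaced A's flag accumulation (d/sc/id over index loops plus a post-hoc if-chain) by construct-and-compare: build the identity-, scalar- and diagonal-pattern matrices of M's shape and classify by whole-matrix equality, in identity/scalar/diagonal/non-diagonal order.
import Mathlib
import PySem

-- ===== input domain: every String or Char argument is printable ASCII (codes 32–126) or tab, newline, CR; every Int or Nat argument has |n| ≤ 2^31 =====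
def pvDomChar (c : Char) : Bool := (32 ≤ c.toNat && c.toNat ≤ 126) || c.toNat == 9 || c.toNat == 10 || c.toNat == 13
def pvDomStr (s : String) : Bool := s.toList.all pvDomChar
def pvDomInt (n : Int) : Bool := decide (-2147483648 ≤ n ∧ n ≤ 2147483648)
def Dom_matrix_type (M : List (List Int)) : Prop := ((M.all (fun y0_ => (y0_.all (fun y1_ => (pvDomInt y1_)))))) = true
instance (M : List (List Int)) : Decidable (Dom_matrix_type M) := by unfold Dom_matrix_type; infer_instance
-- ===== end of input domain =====

-- B replaces A's flag accumulation by construct-and-compare: build the identity-, scalar-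
-- and diagonal-pattern matrices of M's shape and classify by whole-matrix equality.

-- ===== PORT A =====
-- inner loop 'for j in range(len(M[i])): if i!=j and M[i][j]!=0: d=False; break'
def pvInnerA : List Int → Int → Int → Bool → Bool
  | [], _, _, d => d
  | v :: rest, i, j, d => if i ≠ j ∧ v ≠ 0 then false else pvInnerA rest i (j + 1) d

-- outer loop 'for i in range(len(M)): <inner loop>'
def pvOuterA : List (List Int) → Int → Bool → Bool
  | [], _, d => d
  | row :: rest, i, d => pvOuterA rest (i + 1) (pvInnerA row i 0 d)

-- second loop 'for i in range(len(M)): if x != M[i][i]: sc=False; if M[i][i] != 1: id=False'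
def pvScIdA : List (List Int) → Int → Int → Bool × Bool → Bool × Bool
  | [], _, _, p => p
  | row :: rest, i, x, (sc, id) =>
      let v := (PySem.List.pyGet? row i).getD 0
      pvScIdA rest (i + 1) x (if x ≠ v then false else sc, if v ≠ 1 then false else id)

def matrix_type (M : List (List Int)) : String :=
  let x := (PySem.List.pyGet? ((PySem.List.pyGet? M 1).getD []) 1).getD 0
  let d := pvOuterA M 0 true
  let p := pvScIdA M 0 x (true, true)
  let s := if d then "diagonal" else "non-diagonal"
  let s := if d = true ∧ p.1 = true then "scalar" else s
  if d = true ∧ p.2 = true then "identity" else s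

-- ===== PORT B =====
-- 'pattern(dv)': candidate matrix of M's shape with dv (M's own diagonal if dv is None)
-- on the diagonal and zeros elsewhere
def pvPattern (M : List (List Int)) (dv : Option Int) : List (List Int) :=
  (PySem.List.enumerate M 0).map (fun p =>
    (PySem.List.enumerate p.2 0).map (fun q =>
      if p.1 == q.1 then dv.getD ((PySem.List.pyGet? p.2 p.1).getD 0) else 0))

def matrix_type_alt (M : List (List Int)) : String :=
  let ref := (PySem.List.pyGet? ((PySem.List.pyGet? M 1).getD []) 1).getD 0
  if M = pvPattern M (some 1) then "identity"
  else if M = pvPattern M (some ref) then "scalar"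
  else if M = pvPattern M none then "diagonal"
  else "non-diagonal"

-- ===== PRECONDITION & SPEC =====
-- Pre_ excludes exactly the inputs on which Python A raises IndexError:
-- fewer than 2 rows / row 1 shorter than 2 (at x = M[1][1], which i=1 of the ∀ implies),
-- or some row i with fewer than i+1 entries (at M[i][i]).
def Pre_matrix_type (M : List (List Int)) : Prop :=
  2 ≤ M.length ∧ ((List.range M.length).all (fun i => decide (i < (M.getD i []).length))) = true
instance (M : List (List Int)) : Decidable (Pre_matrix_type M) := by unfold Pre_matrix_type; infer_instance

def pvWitness_matrix_type : List (List Int) := [[1, 0], [0, 1]]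

def Spec_matrix_type (M : List (List Int)) (out : String) : Prop := out = matrix_type_alt M
instance (M : List (List Int)) (out : String) : Decidable (Spec_matrix_type M out) := by unfold Spec_matrix_type; infer_instance

-- ===== CLAIM (what is proved, stated in full; the proofs are below) =====
def Claim_equal_matrix_type : Prop := ∀ (M : List (List Int)), Dom_matrix_type M → Pre_matrix_type M → Spec_matrix_type M (matrix_type M)

-- ===== LEMMAS AND PROOFS =====

theorem pvInnerA_eq (row : List Int) (i : Int) : ∀ (j : Int) (d : Bool),
    pvInnerA row i j d
      = (d && !((PySem.List.enumerate row j).any (fun q => decide (i ≠ q.1) && decide (q.2 ≠ 0)))) := by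
  induction row with
  | nil => intro j d; simp [pvInnerA, PySem.List.enumerate_nil]
  | cons v rest ih =>
      intro j d
      rw [PySem.List.enumerate_cons]
      by_cases h : i ≠ j ∧ v ≠ 0
      · simp [pvInnerA, h]
      · have : pvInnerA (v :: rest) i j d = pvInnerA rest i (j + 1) d := by
          simp [pvInnerA, h]
        rw [this, ih]
        push Not at h
        by_cases hij : i = j
        · simp [hij]
        · simp [hij, h hij]

theorem pvOuterA_eq (L : List (List Int)) : ∀ (i : Int) (d : Bool),
    pvOuterA L i d
      = (d && !((PySem.List.enumerate L i).any (fun p =>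
          (PySem.List.enumerate p.2 0).any (fun q => decide (p.1 ≠ q.1) && decide (q.2 ≠ 0))))) := by
  induction L with
  | nil => intro i d; simp [pvOuterA, PySem.List.enumerate_nil]
  | cons row rest ih =>
      intro i d
      rw [PySem.List.enumerate_cons]
      simp only [pvOuterA, ih, pvInnerA_eq, List.any_cons]
      cases d <;>
        cases hrow : (PySem.List.enumerate row 0).any (fun q => decide (i ≠ q.1) && decide (q.2 ≠ 0)) <;>
          simp

theorem pvScIdA_eq (L : List (List Int)) (x : Int) : ∀ (i : Int) (sc id : Bool),
    pvScIdA L i x (sc, id)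
      = (sc && ((PySem.List.enumerate L i).all (fun p => ((PySem.List.pyGet? p.2 p.1).getD 0 : Int) == x)),
         id && ((PySem.List.enumerate L i).all (fun p => ((PySem.List.pyGet? p.2 p.1).getD 0 : Int) == 1))) := by
  induction L with
  | nil => intro i sc id; simp [pvScIdA, PySem.List.enumerate_nil]
  | cons row rest ih =>
      intro i sc id
      rw [PySem.List.enumerate_cons]
      simp only [pvScIdA, ih, List.all_cons]
      by_cases h1 : x = ((PySem.List.pyGet? row i).getD 0 : Int) <;>
        by_cases h2 : ((PySem.List.pyGet? row i).getD 0 : Int) = 1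
      · simp [h1, h2]
      · simp [h1, h2]
      · rw [h2] at h1; simp [h1, Ne.symm h1, h2]
      · simp [h1, Ne.symm h1, h2]

-- rows strictly past the diagonal index: equality with the pattern row = all entries zero
theorem pvRowOff (i dv : Int) (row : List Int) : ∀ j : Int, i < j →
    ((row = (PySem.List.enumerate row j).map (fun q => if i == q.1 then dv else 0))
      ↔ (PySem.List.enumerate row j).any (fun q => decide (i ≠ q.1) && decide (q.2 ≠ 0)) = false) := by
  induction row with
  | nil => intro j _; simp [PySem.List.enumerate_nil]
  | cons v rest ih =>
      intro j hj
      have hne : i ≠ j := by omega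
      have hb : (i == j) = false := by simp [hne]
      rw [PySem.List.enumerate_cons]
      simp only [List.map_cons, List.any_cons, List.cons.injEq, hb, Bool.false_eq_true, if_false,
        Bool.or_eq_false_iff, Bool.and_eq_false_iff, decide_eq_false_iff_not, not_not, ne_eq]
      rw [ih (j + 1) (by omega)]
      constructor
      · rintro ⟨h0, h1⟩; exact ⟨Or.inr h0, h1⟩
      · rintro ⟨h0, h1⟩
        refine ⟨?_, h1⟩
        rcases h0 with h0 | h0
        · exact absurd h0 hne
        · exact h0

-- one row at diagonal index i: equality with the pattern row ↔ off-diagonal zero ∧ row[i] = dv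
theorem pvRowEq (i dv : Int) (row : List Int) : ∀ j : Int, j ≤ i → (i - j).toNat < row.length →
    ((row = (PySem.List.enumerate row j).map (fun q => if i == q.1 then dv else 0))
      ↔ ((PySem.List.enumerate row j).any (fun q => decide (i ≠ q.1) && decide (q.2 ≠ 0)) = false
          ∧ (PySem.List.pyGet? row (i - j)).getD 0 = dv)) := by
  induction row with
  | nil => intro j hj hlen; simp at hlen
  | cons v rest ih =>
      intro j hj hlen
      rw [PySem.List.enumerate_cons]
      by_cases hij : i = j
      · subst hij
        have hz : i - i = (0 : Int) := by omega
        simp only [List.map_cons, List.any_cons, List.cons.injEq, hz,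
          PySem.List.pyGet?_zero_cons, Option.getD_some]
        rw [pvRowOff i dv rest (i + 1) (by omega)]
        simp [and_comm]
      · have hb : (i == j) = false := by simp [hij]
        have hget : PySem.List.pyGet? (v :: rest) (i - j) = PySem.List.pyGet? rest (i - (j + 1)) := by
          have h1 : i - j = ((i - (j + 1)) : Int) + 1 := by omega
          have h2 : 0 ≤ i - (j + 1) := by omega
          rw [h1, ← Int.toNat_of_nonneg h2, PySem.List.pyGet?_cons_succ]
        have hd : (decide (i ≠ j) && decide (v ≠ 0)) = decide (v ≠ 0) := by simp [hij]
        simp only [List.map_cons, List.any_cons, List.cons.injEq, hb, Bool.false_eq_true, if_false,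
          hget, hd]
        rw [ih (j + 1) (by omega) (by simp only [List.length_cons] at hlen; omega)]
        constructor
        · rintro ⟨h0, h1, h2⟩
          subst h0
          exact ⟨by rw [h1, Bool.or_false]; decide, h2⟩
        · rintro ⟨ha, hg⟩
          have hor := Bool.or_eq_false_iff.mp ha
          have hv : v = 0 := by simpa using hor.1
          exact ⟨hv, hor.2, hg⟩

-- whole matrix: M = pattern(dv) ↔ no nonzero off-diagonal entry ∧ every diagonal entry = dv
theorem pvMatEq (dv : Option Int) (L : List (List Int)) : ∀ i : Int,
    (∀ p ∈ PySem.List.enumerate L i, 0 ≤ p.1 ∧ p.1.toNat < p.2.length) →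
    ((L = (PySem.List.enumerate L i).map (fun p =>
        (PySem.List.enumerate p.2 0).map (fun q =>
          if p.1 == q.1 then dv.getD ((PySem.List.pyGet? p.2 p.1).getD 0) else 0)))
      ↔ ((PySem.List.enumerate L i).any (fun p =>
            (PySem.List.enumerate p.2 0).any (fun q => decide (p.1 ≠ q.1) && decide (q.2 ≠ 0))) = false
          ∧ (PySem.List.enumerate L i).all (fun p =>
            ((PySem.List.pyGet? p.2 p.1).getD 0 : Int) == dv.getD ((PySem.List.pyGet? p.2 p.1).getD 0)) = true)) := by
  induction L with
  | nil => intro i _; simp [PySem.List.enumerate_nil]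
  | cons row rest ih =>
      intro i hmem
      rw [PySem.List.enumerate_cons]
      have hhead := hmem (i, row) (by rw [PySem.List.enumerate_cons]; exact List.mem_cons_self)
      have h0i : (0:Int) ≤ i := hhead.1
      have hilen : i.toNat < row.length := hhead.2
      simp only [List.map_cons, List.any_cons, List.all_cons, List.cons.injEq]
      have hrow := pvRowEq i (dv.getD ((PySem.List.pyGet? row i).getD 0)) row 0 (by omega)
        (by omega)
      have hsub : i - 0 = i := by omega
      rw [hsub] at hrow
      rw [ih (i + 1) (by
        intro p hp
        exact hmem p (by rw [PySem.List.enumerate_cons]; exact List.mem_cons_of_mem _ hp))]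
      rw [hrow]
      constructor
      · rintro ⟨⟨h0, h1⟩, h2, h3⟩
        refine ⟨Bool.or_eq_false_iff.mpr ⟨h0, h2⟩, ?_⟩
        rw [h3, Bool.and_true]
        exact beq_iff_eq.mpr h1
      · intro h
        have hA := Bool.or_eq_false_iff.mp h.1
        have hB := Bool.and_eq_true_iff.mp h.2
        exact ⟨⟨hA.1, beq_iff_eq.mp hB.1⟩, hA.2, hB.2⟩

-- ===== VERDICT (by name: the statement is the Claim_ definition above) =====
theorem matrix_type_spec : Claim_equal_matrix_type := by
  intro M _ hpre
  unfold Spec_matrix_type matrix_type matrix_type_alt pvPattern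
  have hmem : ∀ p ∈ PySem.List.enumerate M 0, (0:Int) ≤ p.1 ∧ p.1.toNat < p.2.length := by
    intro p hp
    rw [PySem.List.mem_enumerate_iff] at hp
    obtain ⟨k, hk, rfl⟩ := hp
    have hall := hpre.2
    rw [List.all_eq_true] at hall
    have hrow := hall k (List.mem_range.mpr hk)
    rw [decide_eq_true_eq] at hrow
    refine ⟨by omega, ?_⟩
    have hg : M.getD k [] = M[k] := List.getD_eq_getElem M [] hk
    simp only [hg] at hrow
    simpa using hrow
  have h1 := pvMatEq (some 1) M 0 hmem
  have hr := pvMatEq (some ((PySem.List.pyGet? ((PySem.List.pyGet? M 1).getD []) 1).getD 0)) M 0 hmem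
  have hn := pvMatEq none M 0 hmem
  simp only [Option.getD_some] at h1 hr
  simp only [Option.getD_none, beq_self_eq_true, List.all_eq_true, implies_true, and_true] at hn
  simp only [Option.getD_some, Option.getD_none]
  cases ho : (PySem.List.enumerate M 0).any (fun p =>
      (PySem.List.enumerate p.2 0).any (fun q => decide (p.1 ≠ q.1) && decide (q.2 ≠ 0))) <;>
    cases ha1 : (PySem.List.enumerate M 0).all
        (fun p => ((PySem.List.pyGet? p.2 p.1).getD 0 : Int) == 1) <;>
      cases har : (PySem.List.enumerate M 0).all (fun p =>
          ((PySem.List.pyGet? p.2 p.1).getD 0 : Int)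
            == (PySem.List.pyGet? ((PySem.List.pyGet? M 1).getD []) 1).getD 0)
  -- ho=false, ha1=false, har=false : "diagonal"
  · rw [if_neg (fun hc => absurd (h1.mp hc).2 (by simp [ha1])),
        if_neg (fun hc => absurd (hr.mp hc).2 (by simp [har])),
        if_pos (hn.mpr ho)]
    simp only [pvOuterA_eq, pvScIdA_eq, Bool.true_and, ho, ha1, har]
    simp
  -- ho=false, ha1=false, har=true : "scalar"
  · rw [if_neg (fun hc => absurd (h1.mp hc).2 (by simp [ha1])),
        if_pos (hr.mpr ⟨ho, har⟩)]
    simp only [pvOuterA_eq, pvScIdA_eq, Bool.true_and, ho, ha1, har]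
    simp
  -- ho=false, ha1=true, har=false : "identity"
  · rw [if_pos (h1.mpr ⟨ho, ha1⟩)]
    simp only [pvOuterA_eq, pvScIdA_eq, Bool.true_and, ho, ha1, har]
    simp
  -- ho=false, ha1=true, har=true : "identity"
  · rw [if_pos (h1.mpr ⟨ho, ha1⟩)]
    simp only [pvOuterA_eq, pvScIdA_eq, Bool.true_and, ho, ha1, har]
    simp
  -- ho=true : "non-diagonal" (all four)
  · rw [if_neg (fun hc => absurd (h1.mp hc).1 (by rw [ho]; simp)),
        if_neg (fun hc => absurd (hr.mp hc).1 (by rw [ho]; simp)),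
        if_neg (fun hc => absurd (hn.mp hc) (by rw [ho]; simp))]
    simp only [pvOuterA_eq, pvScIdA_eq, Bool.true_and, ho, ha1, har]
    simp
  · rw [if_neg (fun hc => absurd (h1.mp hc).1 (by rw [ho]; simp)),
        if_neg (fun hc => absurd (hr.mp hc).1 (by rw [ho]; simp)),
        if_neg (fun hc => absurd (hn.mp hc) (by rw [ho]; simp))]
    simp only [pvOuterA_eq, pvScIdA_eq, Bool.true_and, ho, ha1, har]
    simp
  · rw [if_neg (fun hc => absurd (h1.mp hc).1 (by rw [ho]; simp)),
        if_neg (fun hc => absurd (hr.mp hc).1 (by rw [ho]; simp)),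
        if_neg (fun hc => absurd (hn.mp hc) (by rw [ho]; simp))]
    simp only [pvOuterA_eq, pvScIdA_eq, Bool.true_and, ho, ha1, har]
    simp
  · rw [if_neg (fun hc => absurd (h1.mp hc).1 (by rw [ho]; simp)),
        if_neg (fun hc => absurd (hr.mp hc).1 (by rw [ho]; simp)),
        if_neg (fun hc => absurd (hn.mp hc) (by rw [ho]; simp))]
    simp only [pvOuterA_eq, pvScIdA_eq, Bool.true_and, ho, ha1, har]
    simp
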